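-- pv_equiv track=rewrite | github.com/caboooom/Algorithm | 프로그래머스/lv2/131704. 택배상자/택배상자.py | solution
-- ===== SOURCE A (Python) =====
-- def solution(order):
--     answer = 0
--     n = len(order)
--
--     container = 1
--     temp = []
--     truck = 0
--
--     for box in order:
--         if box >= container:
--             while True:
--                 if container == box:
--                     truck += 1
--                     container += 1
--                     break
--                 else:
--                     temp.append(container)
--                 container += 1
--
--         elif len(temp)>0 and temp.pop() == box:
--             truck += 1
--         else:
--             return truck
--
--     return truck
-- ===== SOURCE B (Python) =====
-- def solution(order):
--     # State: m = largest box value loaded so far, processed = set of boxes already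
--     # loaded.  The buried boxes A keeps on its stack are exactly the numbers in
--     # 1..m not yet processed; the reachable (top) one is the largest of them,
--     # found by scanning down from m.
--     m = 0
--     processed = set()
--     i = 0
--     while i < len(order):
--         b = order[i]
--         if b > m:
--             processed.add(b)
--             m = b
--         else:
--             t = m
--             while t in processed:
--                 t -= 1
--             if t == b and t >= 1:
--                 processed.add(b)
--             else:
--                 return i
--         i += 1
--     return i
-- ===== Notes on version B (the rewrite author's own statement) =====
-- stated objective: alternative
-- what changed: A simulates the conveyor with an explicit pending-box stack (pushing every buried conveyor number, popping the top); B keeps only the maximum box seen and a set of delivered boxes, and recomputes the reachable buried box by scanning downward from the maximum for the first undelivered number.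
import Mathlib
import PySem

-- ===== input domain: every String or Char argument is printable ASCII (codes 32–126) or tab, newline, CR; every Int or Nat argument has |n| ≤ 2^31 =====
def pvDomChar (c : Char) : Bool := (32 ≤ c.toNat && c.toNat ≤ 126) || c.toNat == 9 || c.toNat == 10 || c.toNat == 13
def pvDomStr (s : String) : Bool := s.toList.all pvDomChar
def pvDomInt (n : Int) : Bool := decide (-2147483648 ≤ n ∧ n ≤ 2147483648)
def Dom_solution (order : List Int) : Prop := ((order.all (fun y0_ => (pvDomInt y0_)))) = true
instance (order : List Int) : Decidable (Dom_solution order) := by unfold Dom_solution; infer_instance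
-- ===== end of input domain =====

-- B replaces A's explicit pending-box stack by a (max-seen, delivered-set) state and
-- recomputes the reachable pending box by scanning down from the max (objective: alternative).

-- ===== PORT A =====
-- inner 'while True' of A: advance the conveyor, burying boxes, until it reaches `box`.
-- Stack is stored top-first (Python appends/pops at the end).  The final 'else' branch is
-- a totality guard only: A reaches this loop only with container ≤ box.
def fillA (box c : Int) (temp : List Int) : Int × List Int :=
  if c = box then (c + 1, temp)
  else if c < box then fillA box (c + 1) (c :: temp)
  else (c + 1, temp)
termination_by (box - c).toNat
decreasing_by omega

def loopA : List Int → Int → List Int → Int → Int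
  | [], _, _, truck => truck
  | box :: rest, container, temp, truck =>
    if container ≤ box then
      let r := fillA box container temp
      loopA rest r.1 r.2 (truck + 1)
    else
      match temp with
      | [] => truck
      | t :: ts => if t = box then loopA rest container ts (truck + 1) else truck

def solution (order : List Int) : Int := loopA order 1 [] 0

-- ===== PORT B =====
-- inner 'while t in processed: t -= 1' of B
def scanB (processed : List Int) (t : Int) : Int :=
  if t ∈ processed then scanB processed (t - 1) else t
termination_by (processed.filter (fun x => decide (x ≤ t))).length
decreasing_by
  rename_i h
  have h1 : processed.filter (fun x => decide (x ≤ t - 1))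
      = (processed.filter (fun x => decide (x ≤ t))).filter (fun x => decide (x ≤ t - 1)) := by
    rw [List.filter_filter]
    apply List.filter_congr
    intro x _
    by_cases hx : x ≤ t - 1
    · have hxt : x ≤ t := by omega
      simp [hx, hxt]
    · simp [hx]
  rw [h1]
  refine List.length_filter_lt_length_iff_exists.mpr ⟨t, ?_⟩
  simp [h]

def loopB : List Int → Int → List Int → Int → Int
  | [], _, _, i => i
  | b :: rest, m, processed, i =>
    if m < b then loopB rest b (PySem.Set.add processed b) (i + 1)
    else
      let t := scanB processed m
      if t = b ∧ 1 ≤ t then loopB rest m (PySem.Set.add processed b) (i + 1)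
      else i

def solution_alt (order : List Int) : Int := loopB order 0 [] 0

-- ===== PRECONDITION & SPEC =====
def Spec_solution (order : List Int) (out : Int) : Prop := out = solution_alt order
instance (order : List Int) (out : Int) : Decidable (Spec_solution order out) := by unfold Spec_solution; infer_instance

-- ===== CLAIM (what is proved, stated in full; the proofs are below) =====
def Claim_equal_solution : Prop := ∀ (order : List Int), Dom_solution order → Spec_solution order (solution order)

-- ===== LEMMAS AND PROOFS =====

-- The coupling invariant between A's state and B's state.
def InvAB (container : Int) (temp : List Int) (m : Int) (processed : List Int) : Prop :=
  container = m + 1 ∧ 0 ≤ m ∧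
  (∀ x ∈ processed, 1 ≤ x ∧ x ≤ m) ∧
  (∀ x, x ∈ temp ↔ (1 ≤ x ∧ x ≤ m ∧ x ∉ processed)) ∧
  List.Pairwise (· > ·) temp

lemma fillA_eq_of_lt (box c : Int) (temp : List Int) (h : c < box) :
    fillA box c temp = fillA box (c + 1) (c :: temp) := by
  rw [fillA]; simp [show ¬ c = box by omega, h]

lemma fillA_eq_self (box : Int) (temp : List Int) :
    fillA box box temp = (box + 1, temp) := by
  rw [fillA]; simp

lemma fillA_spec : ∀ (k : Nat) (box c : Int) (temp : List Int), c = box - k →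
    (fillA box c temp).1 = box + 1 ∧
    (∀ x, x ∈ (fillA box c temp).2 ↔ ((c ≤ x ∧ x < box) ∨ x ∈ temp)) ∧
    ((∀ y ∈ temp, y < c) → List.Pairwise (· > ·) temp →
      List.Pairwise (· > ·) (fillA box c temp).2) := by
  intro k
  induction k with
  | zero =>
    intro box c temp hc
    have : c = box := by simpa using hc
    subst this
    rw [fillA_eq_self]
    refine ⟨rfl, ?_, ?_⟩
    · intro x; constructor
      · intro hx; exact Or.inr hx
      · rintro (⟨h1, h2⟩ | hx); · omega
        · exact hx
    · intro _ hp; exact hp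
  | succ k ih =>
    intro box c temp hc
    have hlt : c < box := by omega
    rw [fillA_eq_of_lt box c temp hlt]
    obtain ⟨h1, h2, h3⟩ := ih box (c + 1) (c :: temp) (by omega)
    refine ⟨h1, ?_, ?_⟩
    · intro x
      rw [h2 x]
      simp only [List.mem_cons]
      constructor
      · rintro (⟨ha, hb⟩ | (rfl | hx))
        · exact Or.inl ⟨by omega, hb⟩
        · exact Or.inl ⟨le_refl _, hlt⟩
        · exact Or.inr hx
      · rintro (⟨ha, hb⟩ | hx)
        · by_cases hxc : x = c
          · exact Or.inr (Or.inl hxc)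
          · exact Or.inl ⟨by omega, hb⟩
        · exact Or.inr (Or.inr hx)
    · intro hlt' hp
      apply h3
      · intro y hy
        rcases List.mem_cons.mp hy with rfl | hy'
        · omega
        · have := hlt' y hy'; omega
      · exact List.pairwise_cons.mpr ⟨fun y hy => hlt' y hy, hp⟩

lemma scanB_unfold (processed : List Int) (t : Int) :
    scanB processed t = if t ∈ processed then scanB processed (t - 1) else t := by
  rw [scanB]

lemma scanB_eq : ∀ (k : Nat) (processed : List Int) (h m : Int), m - h = k → h ≤ m →
    h ∉ processed → (∀ x, h < x → x ≤ m → x ∈ processed) → scanB processed m = h := by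
  intro k
  induction k with
  | zero =>
    intro processed h m hk hle hnot _
    have : m = h := by omega
    subst this
    rw [scanB_unfold]; simp [hnot]
  | succ k ih =>
    intro processed h m hk hle hnot hall
    have hm : m ∈ processed := hall m (by omega) (le_refl _)
    rw [scanB_unfold]; simp only [hm, if_pos]
    exact ih processed h (m - 1) (by omega) (by omega) hnot
      (fun x hx1 hx2 => hall x hx1 (by omega))

lemma loop_eq : ∀ (rest : List Int) (container : Int) (temp : List Int) (m : Int)
    (processed : List Int) (acc : Int), InvAB container temp m processed →
    loopA rest container temp acc = loopB rest m processed acc := by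
  intro rest
  induction rest with
  | nil => intro _ _ _ _ _ _; rfl
  | cons box rest ih =>
    intro container temp m processed acc hinv
    obtain ⟨hc, hm0, hbnd, hmem, hpw⟩ := hinv
    subst hc
    by_cases hb : m < box
    · -- A takes the conveyor-advancing branch, B the new-max branch
      have hle : m + 1 ≤ box := by omega
      obtain ⟨h1, h2, h3⟩ := fillA_spec (box - (m + 1)).toNat box (m + 1) temp (by omega)
      have hA : loopA (box :: rest) (m + 1) temp acc
          = loopA rest (fillA box (m + 1) temp).1 (fillA box (m + 1) temp).2 (acc + 1) := by
        simp [loopA, hle]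
      have hB : loopB (box :: rest) m processed acc
          = loopB rest box (PySem.Set.add processed box) (acc + 1) := by
        simp [loopB, hb]
      rw [hA, hB, h1]
      apply ih
      refine ⟨rfl, by omega, ?_, ?_, ?_⟩
      · intro x hx
        rw [PySem.Set.mem_add] at hx
        rcases hx with hx | rfl
        · have := hbnd x hx; omega
        · omega
      · intro x
        rw [h2 x, hmem x, PySem.Set.mem_add]
        constructor
        · rintro (⟨ha, hb'⟩ | ⟨ha, hb', hcp⟩)
          · refine ⟨by omega, by omega, ?_⟩
            rintro (hx | rfl)
            · have := hbnd x hx; omega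
            · omega
          · refine ⟨ha, by omega, ?_⟩
            rintro (hx | rfl)
            · exact hcp hx
            · omega
        · rintro ⟨ha, hb', hcp⟩
          by_cases hx : m + 1 ≤ x
          · exact Or.inl ⟨hx, by
              rcases lt_or_eq_of_le hb' with h | h
              · exact h
              · exact absurd (Or.inr h) hcp⟩
          · exact Or.inr ⟨ha, by omega, fun hq => hcp (Or.inl hq)⟩
      · apply h3
        · intro y hy; have := (hmem y).mp hy; omega
        · exact hpw
    · -- box < container: A pops/returns, B scans
      have hgt : ¬ m + 1 ≤ box := by omega
      have hB : loopB (box :: rest) m processed acc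
          = if scanB processed m = box ∧ 1 ≤ scanB processed m
            then loopB rest m (PySem.Set.add processed box) (acc + 1) else acc := by
        simp [loopB, hb]
      cases temp with
      | nil =>
        have hscan : scanB processed m = 0 := by
          apply scanB_eq m.toNat processed 0 m (by omega) hm0
          · intro hx; have := hbnd 0 hx; omega
          · intro x hx1 hx2
            by_contra hnp
            have := (hmem x).mpr ⟨by omega, hx2, hnp⟩
            simp at this
        rw [hB, hscan]
        simp [loopA, hgt]
      | cons h ts =>
        have hA : loopA (box :: rest) (m + 1) (h :: ts) acc
            = if h = box then loopA rest (m + 1) ts (acc + 1) else acc := by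
          simp [loopA, hgt]
        have hhmem : 1 ≤ h ∧ h ≤ m ∧ h ∉ processed := (hmem h).mp (by simp)
        have hts : ∀ y ∈ ts, h > y := (List.pairwise_cons.mp hpw).1
        have hscan : scanB processed m = h := by
          apply scanB_eq (m - h).toNat processed h m (by omega) hhmem.2.1 hhmem.2.2
          intro x hx1 hx2
          by_contra hnp
          have hxt := (hmem x).mpr ⟨by omega, hx2, hnp⟩
          rcases List.mem_cons.mp hxt with rfl | hx'
          · omega
          · have := hts x hx'; omega
        rw [hA, hB, hscan]
        by_cases hbx : h = box
        · subst hbx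
          rw [if_pos rfl, if_pos ⟨rfl, hhmem.1⟩]
          apply ih
          refine ⟨rfl, hm0, ?_, ?_, (List.pairwise_cons.mp hpw).2⟩
          · intro x hx
            rw [PySem.Set.mem_add] at hx
            rcases hx with hx | rfl
            · exact hbnd x hx
            · exact ⟨hhmem.1, hhmem.2.1⟩
          · intro x
            rw [PySem.Set.mem_add]
            constructor
            · intro hx
              have hxt := (hmem x).mp (List.mem_cons_of_mem _ hx)
              refine ⟨hxt.1, hxt.2.1, ?_⟩
              rintro (hq | rfl)
              · exact hxt.2.2 hq
              · exact absurd hx (by have := hts x hx; omega)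
            · rintro ⟨ha, hb', hcp⟩
              have hxt := (hmem x).mpr ⟨ha, hb', fun hq => hcp (Or.inl hq)⟩
              rcases List.mem_cons.mp hxt with rfl | hx'
              · exact absurd (Or.inr rfl) hcp
              · exact hx'
        · rw [if_neg hbx, if_neg (by rintro ⟨h1, _⟩; exact hbx h1)]

-- ===== VERDICT (by name: the statement is the Claim_ definition above) =====
theorem solution_spec : Claim_equal_solution := by
  intro order _
  unfold Spec_solution solution solution_alt
  apply loop_eq
  refine ⟨rfl, le_refl 0, by simp, by simp; omega, List.Pairwise.nil⟩
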